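-- pv_equiv track=rewrite | github.com/shelbycoyle13/ls_core | PY110/SPOT_Wiki_Problems/spot_wiki_09.py | scramble_words
-- ===== SOURCE A (Python) =====
-- def scramble_words(text):
--     def scramble(word):
--         if len(word) <= 3:  # Words of length <= 3 remain unchanged
--             return word
--         first, last = word[0], word[-1]
--         middle = word[1:-1]
--
--         # Separate letters and punctuation
--         letters = [char for char in middle if char.isalpha()]
--         sorted_letters = sorted(letters)  # Sort the letters only
--
--         # Reconstruct the middle part with punctuation in place
--         result_middle = []
--         letter_index = 0
--         for char in middle:
--             if char.isalpha():
--                 result_middle.append(sorted_letters[letter_index])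
--                 letter_index += 1
--             else:
--                 result_middle.append(char)  # Preserve punctuation
--
--         return first + ''.join(result_middle) + last
--
--     # Process each word in the input
--     result = []
--     current_word = ""
--
--     for char in text:
--         if char.isalnum() or char == "'":  # Part of a word
--             current_word += char
--         else:  # Punctuation or space
--             if current_word:  # Process the current word before punctuation
--                 result.append(scramble(current_word))
--                 current_word = ""
--             result.append(char)  # Append the non-word character directly
--
--     if current_word:  # Add the last word if there is one
--         result.append(scramble(current_word))
--
--     return ''.join(result)
-- ===== SOURCE B (Python) =====
-- def scramble_words(text):
--     def is_word_char(c):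
--         return c.isalnum() or c == "'"
--
--     def scramble(word):
--         if len(word) <= 3:
--             return word
--         middle = word[1:-1]
--         letters = iter(sorted(c for c in middle if c.isalpha()))
--         rebuilt = ''.join(next(letters) if c.isalpha() else c for c in middle)
--         return word[0] + rebuilt + word[-1]
--
--     pieces = []
--     i, n = 0, len(text)
--     while i < n:
--         if is_word_char(text[i]):
--             j = i
--             while j < n and is_word_char(text[j]):
--                 j += 1
--             pieces.append(scramble(text[i:j]))
--             i = j
--         else:
--             pieces.append(text[i])
--             i += 1
--     return ''.join(pieces)
-- ===== Notes on version B (the rewrite author's own statement) =====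
-- stated objective: alternative
-- what changed: Replaced A's char-by-char accumulator loop with an index-free maximal-run scan (span/takeWhile grouping, one piece per word run or non-word char), and rebuilt the scrambled middle by consuming the sorted letters as a stream instead of indexing them with a running counter.
import Mathlib
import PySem

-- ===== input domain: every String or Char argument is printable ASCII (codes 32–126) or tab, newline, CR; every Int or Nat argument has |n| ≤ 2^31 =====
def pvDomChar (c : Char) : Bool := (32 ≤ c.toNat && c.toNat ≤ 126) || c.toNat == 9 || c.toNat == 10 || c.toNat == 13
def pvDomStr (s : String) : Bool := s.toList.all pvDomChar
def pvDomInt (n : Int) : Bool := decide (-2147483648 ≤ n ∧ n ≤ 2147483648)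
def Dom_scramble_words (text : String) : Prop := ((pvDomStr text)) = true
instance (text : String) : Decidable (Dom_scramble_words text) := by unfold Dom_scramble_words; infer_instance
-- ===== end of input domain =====

-- B: same scrambling, but by maximal-run grouping (span/takeWhile) instead of A's
-- char-by-char accumulator loop, and the middle is rebuilt by consuming the sorted
-- letters as a stream instead of indexing with a counter (objective: alternative).

-- shared character class: char.isalnum() or char == "'"
def pvWordChar (c : Char) : Bool := PySem.Chars.isalnum c || c == '\''

-- ===== PORT A =====
-- A's middle-rebuild loop body: index into sorted_letters with a running counter.
-- sorted_letters[letter_index] is always in range on the inputs scramble feeds it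
-- (one sorted letter per alpha position), so pyGetD's default ' ' is never used — exact.
def pvMidStep (sls : List Char) (st : List Char × Nat) (c : Char) : List Char × Nat :=
  if PySem.Chars.isalpha c then
    (st.1 ++ [PySem.List.pyGetD sls (st.2 : Int) ' '], st.2 + 1)
  else (st.1 ++ [c], st.2)

-- word[0] / word[-1] are in range on the branch taken (length > 3), so the
-- pyGetD default ' ' is never used — exact.
def pvScrambleA (word : List Char) : List Char :=
  if word.length ≤ 3 then word
  else
    let first := PySem.List.pyGetD word 0 ' '
    let last := PySem.List.pyGetD word (-1) ' '
    let middle := PySem.List.slice word (some 1) (some (-1))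
    let letters := middle.filter (fun c => PySem.Chars.isalpha c)
    let sorted_letters := PySem.List.sorted letters (fun c => c) false
    let st := middle.foldl (pvMidStep sorted_letters) ([], 0)
    [first] ++ st.1 ++ [last]

-- the body of A's `for char in text` loop
def pvStepA (st : List (List Char) × List Char) (c : Char) : List (List Char) × List Char :=
  if pvWordChar c then (st.1, st.2 ++ [c])
  else ((if st.2.isEmpty then st.1 else st.1 ++ [pvScrambleA st.2]) ++ [[c]], [])

def scramble_words (text : String) : String :=
  let st := text.toList.foldl pvStepA ([], [])
  String.ofList (if st.2.isEmpty then st.1 else st.1 ++ [pvScrambleA st.2]).flatten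

-- ===== PORT B =====
-- B's middle rebuild: consume the sorted letters as a stream (next(letters));
-- the iterator is never exhausted (one sorted letter per alpha position), so
-- headD's default ' ' is never used — exact.
def pvFillB : List Char → List Char → List Char
  | [], _ => []
  | c :: cs, ls =>
    if PySem.Chars.isalpha c then ls.headD ' ' :: pvFillB cs ls.tail
    else c :: pvFillB cs ls

def pvScrambleB (word : List Char) : List Char :=
  if word.length ≤ 3 then word
  else
    let middle := PySem.List.slice word (some 1) (some (-1))
    let sorted_letters :=
      PySem.List.sorted (middle.filter (fun c => PySem.Chars.isalpha c)) (fun c => c) false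
    [PySem.List.pyGetD word 0 ' '] ++ pvFillB middle sorted_letters ++
      [PySem.List.pyGetD word (-1) ' ']

-- B's outer scan: emit one piece per maximal word run / per non-word char.
def pvGoB : List Char → List (List Char)
  | [] => []
  | c :: cs =>
    if pvWordChar c then
      pvScrambleB (c :: cs.takeWhile pvWordChar) :: pvGoB (cs.dropWhile pvWordChar)
    else [c] :: pvGoB cs
termination_by l => l.length
decreasing_by
  · exact Nat.lt_succ_of_le (List.length_dropWhile_le _ _)
  · exact Nat.lt_succ_self _

def scramble_words_alt (text : String) : String :=
  String.ofList (pvGoB text.toList).flatten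

-- ===== PRECONDITION & SPEC =====
def Spec_scramble_words (text : String) (out : String) : Prop := out = scramble_words_alt text
instance (text : String) (out : String) : Decidable (Spec_scramble_words text out) := by unfold Spec_scramble_words; infer_instance

-- ===== CLAIM (what is proved, stated in full; the proofs are below) =====
def Claim_equal_scramble_words : Prop := ∀ (text : String), Dom_scramble_words text → Spec_scramble_words text (scramble_words text)

-- ===== LEMMAS AND PROOFS =====

-- A's counter-indexed middle rebuild equals B's stream-consuming rebuild.
lemma pvFill_eq (sls : List Char) :
    ∀ (mid : List Char) (acc : List Char) (i : Nat),
      (mid.foldl (pvMidStep sls) (acc, i)).1 = acc ++ pvFillB mid (sls.drop i) := by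
  intro mid
  induction mid with
  | nil => intro acc i; simp only [List.foldl_nil, pvFillB, List.append_nil]
  | cons c cs ih =>
    intro acc i
    rw [List.foldl_cons]
    by_cases h : PySem.Chars.isalpha c = true
    · have hs : pvMidStep sls (acc, i) c
          = (acc ++ [PySem.List.pyGetD sls (i : Int) ' '], i + 1) := by
        simp [pvMidStep, h]
      have h1 : PySem.List.pyGetD sls (i : Int) ' ' = (sls.drop i).headD ' ' := by
        rw [PySem.List.pyGetD_natCast, List.getD_eq_getElem?_getD, List.headD_eq_head?_getD,
          List.head?_drop]
      have h2 : sls.drop (i + 1) = (sls.drop i).tail := by rw [List.tail_drop]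
      have hf : pvFillB (c :: cs) (sls.drop i)
          = (sls.drop i).headD ' ' :: pvFillB cs (sls.drop i).tail := by
        rw [pvFillB, if_pos h]
      rw [hs, ih, h1, h2, hf]
      simp
    · have hs : pvMidStep sls (acc, i) c = (acc ++ [c], i) := by
        simp [pvMidStep, h]
      have hf : pvFillB (c :: cs) (sls.drop i) = c :: pvFillB cs (sls.drop i) := by
        rw [pvFillB, if_neg h]
      rw [hs, ih, hf]
      simp

lemma pvScramble_eq (word : List Char) : pvScrambleA word = pvScrambleB word := by
  by_cases h : word.length ≤ 3
  · simp [pvScrambleA, pvScrambleB, h]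
  · simp only [pvScrambleA, pvScrambleB, if_neg h]
    rw [pvFill_eq _ _ [] 0]
    simp

def pvEmit (cur w : List Char) : List (List Char) :=
  if (cur ++ w).isEmpty then [] else [pvScrambleA (cur ++ w)]

lemma pvGoB_unfold (l : List Char) :
    pvGoB l = pvEmit [] (l.takeWhile pvWordChar) ++ pvGoB (l.dropWhile pvWordChar) := by
  cases l with
  | nil => simp [pvGoB, pvEmit]
  | cons c cs =>
    by_cases h : pvWordChar c = true
    · rw [pvGoB, if_pos h, List.takeWhile_cons_of_pos h, List.dropWhile_cons_of_pos h]
      simp [pvEmit, pvScramble_eq]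
    · have hu : pvGoB (c :: cs) = [c] :: pvGoB cs := by rw [pvGoB, if_neg h]
      rw [List.takeWhile_cons_of_neg h, List.dropWhile_cons_of_neg h]
      simp [pvEmit, hu]

def pvFinish (st : List (List Char) × List Char) : List (List Char) :=
  if st.2.isEmpty then st.1 else st.1 ++ [pvScrambleA st.2]

lemma pvMain (chars : List Char) :
    ∀ (res : List (List Char)) (cur : List Char),
      pvFinish (chars.foldl pvStepA (res, cur))
        = res ++ pvEmit cur (chars.takeWhile pvWordChar) ++ pvGoB (chars.dropWhile pvWordChar) := by
  induction chars with
  | nil =>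
    intro res cur
    simp only [List.foldl_nil, List.takeWhile_nil, List.dropWhile_nil]
    by_cases hc : cur.isEmpty <;> simp [pvFinish, pvEmit, pvGoB, hc]
  | cons c cs ih =>
    intro res cur
    rw [List.foldl_cons]
    by_cases h : pvWordChar c = true
    · have hs : pvStepA (res, cur) c = (res, cur ++ [c]) := by simp [pvStepA, h]
      rw [hs, ih, List.takeWhile_cons_of_pos h, List.dropWhile_cons_of_pos h]
      have he : pvEmit (cur ++ [c]) (cs.takeWhile pvWordChar)
          = pvEmit cur (c :: cs.takeWhile pvWordChar) := by
        simp [pvEmit, List.append_assoc]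
      rw [he]
    · have hs : pvStepA (res, cur) c
          = ((if cur.isEmpty then res else res ++ [pvScrambleA cur]) ++ [[c]], []) := by
        simp [pvStepA, h]
      rw [hs, ih, List.takeWhile_cons_of_neg h, List.dropWhile_cons_of_neg h]
      rw [pvGoB, if_neg h, pvGoB_unfold cs]
      by_cases hc : cur.isEmpty <;> simp [pvEmit, hc, List.append_assoc]

-- ===== VERDICT (by name: the statement is the Claim_ definition above) =====
theorem scramble_words_spec : Claim_equal_scramble_words := by
  intro text _
  show scramble_words text = scramble_words_alt text
  unfold scramble_words scramble_words_alt
  have h := pvMain text.toList [] []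
  rw [pvGoB_unfold text.toList]
  simp only [pvFinish] at h
  simp only [h, List.nil_append]
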